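-- pv_equiv track=rewrite | github.com/jchristel/SampleCodeRevitBatchProcessor | duHast/src/duHast/Revit/Categories/Utility/category_properties_get_utils.py | get_saved_category_property_by_name
-- ===== SOURCE A (Python) =====
-- def get_saved_category_property_by_name(properties, prop_names):
--     """
--     Returns property values matching property names in saved category data.
--     :param properties: List of dictionaries in format as per GetCategoryProperties(cat) method.
--     :type properties: list [{str: var}]
--     :param prop_names: List of property names of which the values are to be returned
--     :type prop_names: list str
--     :return: A list of values.
--     :rtype: list var
--     """
--
--     prop_values = []
--     for prop_name in prop_names:
--         match = False
--         for saved_prop in properties: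
--             if prop_name in saved_prop:
--                 prop_values.append(saved_prop[prop_name])
--                 match = True
--         if match == False:
--             prop_values.append(None)
--     return prop_values
-- ===== SOURCE B (Python) =====
-- def get_saved_category_property_by_name(properties, prop_names):
--     index = {}
--     for saved_prop in properties:
--         for key, value in saved_prop.items():
--             index.setdefault(key, []).append(value)
--     prop_values = []
--     for prop_name in prop_names:
--         prop_values.extend(index.get(prop_name, [None]))
--     return prop_values
-- ===== Notes on version B (the rewrite author's own statement) =====
-- stated objective: faster
-- what changed: B builds a name-to-list-of-values index over all property dicts in one pass and then answers each requested name by a single dictionary lookup, instead of A's full scan of all dicts per requested name.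
import Mathlib
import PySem

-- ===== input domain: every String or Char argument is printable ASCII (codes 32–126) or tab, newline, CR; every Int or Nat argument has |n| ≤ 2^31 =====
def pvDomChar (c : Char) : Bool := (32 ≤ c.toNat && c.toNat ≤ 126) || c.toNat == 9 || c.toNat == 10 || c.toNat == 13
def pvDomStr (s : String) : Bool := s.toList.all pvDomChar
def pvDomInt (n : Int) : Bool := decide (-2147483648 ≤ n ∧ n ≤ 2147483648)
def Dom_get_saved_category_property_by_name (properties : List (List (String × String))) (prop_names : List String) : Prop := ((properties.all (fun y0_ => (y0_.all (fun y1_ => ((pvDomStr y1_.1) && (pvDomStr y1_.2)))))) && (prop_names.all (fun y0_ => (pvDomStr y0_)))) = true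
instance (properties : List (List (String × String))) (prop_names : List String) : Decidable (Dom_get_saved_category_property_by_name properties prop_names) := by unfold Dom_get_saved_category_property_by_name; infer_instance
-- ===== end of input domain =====

-- B replaces A's per-name scan of all property dicts by a name→values index built in
-- one pass, then one lookup per name (measurably faster per the asymptotic change).

-- ===== PORT A =====
-- for prop_name in prop_names: match=False; for saved_prop in properties:
--   if prop_name in saved_prop: append saved_prop[prop_name]; match=True
-- if not match: append None
def get_saved_category_property_by_name (properties : List (List (String × String))) (prop_names : List String) : List (Option String) :=
  prop_names.foldl (fun prop_values prop_name =>
    let r := properties.foldl (fun (st : List (Option String) × Bool) saved_prop =>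
      match (PySem.Dict.mk saved_prop).get? prop_name with
      | some v => (st.1 ++ [some v], true)
      | none => st) (prop_values, false)
    if r.2 then r.1 else r.1 ++ [none]) []

-- ===== PORT B =====
-- index = {}; for saved_prop in properties: for (k, v) in saved_prop.items():
--   index.setdefault(k, []).append(v)   (= index[k] = index.get(k, []) + [v])
def pvBuildIndex (properties : List (List (String × String))) : PySem.Dict String (List String) :=
  properties.foldl (fun index saved_prop =>
    saved_prop.foldl (fun index kv => index.modify kv.1 [] (· ++ [kv.2])) index)
    PySem.Dict.empty

-- for prop_name in prop_names: prop_values.extend(index.get(prop_name, [None]))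
def get_saved_category_property_by_name_alt (properties : List (List (String × String))) (prop_names : List String) : List (Option String) :=
  let index := pvBuildIndex properties
  prop_names.foldl (fun prop_values prop_name =>
    prop_values ++
      (match index.get? prop_name with
       | some vs => vs.map some
       | none => [none])) []

-- ===== PRECONDITION & SPEC =====
-- Pre_ excludes inner association lists with duplicate keys: those do not represent a
-- Python dict (Python collapses duplicate keys before the function runs), and on them
-- the first-match vs all-matches readings of the same dict diverge.
def Pre_get_saved_category_property_by_name (properties : List (List (String × String))) (prop_names : List String) : Prop :=
  ∀ saved_prop ∈ properties, (saved_prop.map Prod.fst).Nodup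

instance (properties : List (List (String × String))) (prop_names : List String) : Decidable (Pre_get_saved_category_property_by_name properties prop_names) := by
  unfold Pre_get_saved_category_property_by_name; infer_instance

def pvWitness_get_saved_category_property_by_name : (List (List (String × String))) × List String :=
  ([[("a", "1")], [("b", "2"), ("a", "3")]], ["a", "c", "b"])

def Spec_get_saved_category_property_by_name (properties : List (List (String × String))) (prop_names : List String) (out : List (Option String)) : Prop := out = get_saved_category_property_by_name_alt properties prop_names
instance (properties : List (List (String × String))) (prop_names : List String) (out : List (Option String)) : Decidable (Spec_get_saved_category_property_by_name properties prop_names out) := by unfold Spec_get_saved_category_property_by_name; infer_instance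

-- ===== CLAIM (what is proved, stated in full; the proofs are below) =====
def Claim_equal_get_saved_category_property_by_name : Prop := ∀ (properties : List (List (String × String))) (prop_names : List String), Dom_get_saved_category_property_by_name properties prop_names → Pre_get_saved_category_property_by_name properties prop_names → Spec_get_saved_category_property_by_name properties prop_names (get_saved_category_property_by_name properties prop_names)

-- ===== LEMMAS AND PROOFS =====

-- the values A collects for one name: first match in each dict, in dict order
def pvGather (properties : List (List (String × String))) (prop_name : String) : List String :=
  properties.filterMap (fun saved_prop => (PySem.Dict.mk saved_prop).get? prop_name)

-- A's inner loop, characterised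
theorem pvA_inner (properties : List (List (String × String))) (prop_name : String)
    (acc : List (Option String)) (b : Bool) :
    properties.foldl (fun (st : List (Option String) × Bool) saved_prop =>
      match (PySem.Dict.mk saved_prop).get? prop_name with
      | some v => (st.1 ++ [some v], true)
      | none => st) (acc, b)
    = (acc ++ (pvGather properties prop_name).map some,
       b || !(pvGather properties prop_name).isEmpty) := by
  induction properties generalizing acc b with
  | nil => simp [pvGather]
  | cons d ds ih =>
    simp only [List.foldl_cons, pvGather, List.filterMap_cons]
    cases h : (PySem.Dict.mk d).get? prop_name with
    | none => simpa [pvGather] using ih acc b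
    | some v => simpa [pvGather, List.isEmpty] using ih (acc ++ [some v]) true

-- both programs compute names.foldl (fun acc n => acc ++ pvStep properties n) []
def pvStep (properties : List (List (String × String))) (prop_name : String) : List (Option String) :=
  if (pvGather properties prop_name).isEmpty then [none]
  else (pvGather properties prop_name).map some

theorem pvA_eq_foldl_step (properties : List (List (String × String))) (prop_names : List String) :
    get_saved_category_property_by_name properties prop_names
    = prop_names.foldl (fun acc n => acc ++ pvStep properties n) [] := by
  unfold get_saved_category_property_by_name
  apply PySem.List.foldl_congr_mem
  intro acc n _
  rw [pvA_inner]
  by_cases h : (pvGather properties n).isEmpty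
  · simp [pvStep, List.isEmpty_iff.mp h]
  · simp [pvStep, h]

-- the nested index-building loop is the flat loop over the concatenated entries
theorem pvBuildIndex_eq_flat (properties : List (List (String × String))) :
    pvBuildIndex properties
    = (properties.flatten).foldl (fun index kv => index.modify kv.1 [] (· ++ [kv.2]))
        PySem.Dict.empty := by
  unfold pvBuildIndex
  rw [List.foldl_flatten]

theorem pv_contains_fold (L : List (String × String)) (idx : PySem.Dict String (List String))
    (c : String) :
    (L.foldl (fun index kv => index.modify kv.1 [] (· ++ [kv.2])) idx).contains c
    = (idx.contains c || !(L.filter (fun p => p.1 == c)).isEmpty) := by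
  induction L generalizing idx with
  | nil => simp
  | cons kv L ih =>
    simp only [List.foldl_cons, List.filter_cons]
    rw [ih]
    by_cases h : kv.1 = c
    · simp [PySem.Dict.contains_modify, h]
    · have : (kv.1 == c) = false := by simp [h]
      simp [PySem.Dict.contains_modify, this, BEq.comm (a := c)]

-- get? of the built index, for one name
theorem pv_get?_fold (L : List (String × String)) (c : String) :
    (L.foldl (fun index kv => index.modify kv.1 [] (· ++ [kv.2])) PySem.Dict.empty).get? c
    = (if (L.filter (fun p => p.1 == c)).isEmpty then none
       else some ((L.filter (fun p => p.1 == c)).map (·.2))) := by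
  have hc := pv_contains_fold L PySem.Dict.empty c
  have hd := PySem.Dict.getD_foldl_modify_append L PySem.Dict.empty c
  simp only [PySem.Dict.contains_empty, Bool.false_or] at hc
  simp only [PySem.Dict.getD_empty, List.nil_append] at hd
  have hsome := PySem.Dict.contains_eq_isSome_get?
    (L.foldl (fun index kv => index.modify kv.1 [] (· ++ [kv.2])) PySem.Dict.empty) c
  by_cases h : (L.filter (fun p => p.1 == c)).isEmpty
  · simp only [h, if_pos]
    rw [hc, h] at hsome
    cases hg : (L.foldl (fun index kv => index.modify kv.1 [] (· ++ [kv.2])) PySem.Dict.empty).get? c with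
    | none => rfl
    | some vs => rw [hg] at hsome; simp at hsome
  · simp only [h, if_false, Bool.false_eq_true]
    rw [hc] at hsome
    simp only [h, Bool.not_false] at hsome
    cases hg : (L.foldl (fun index kv => index.modify kv.1 [] (· ++ [kv.2])) PySem.Dict.empty).get? c with
    | none => rw [hg] at hsome; simp at hsome
    | some vs =>
      have hv : (L.foldl (fun index kv => index.modify kv.1 [] (· ++ [kv.2])) PySem.Dict.empty).getD c [] = vs :=
        PySem.Dict.getD_of_get?_eq_some _ [] hg
      rw [hd] at hv
      rw [← hv]

-- under Nodup keys, one dict's filtered entries are exactly its first-match lookup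
theorem pv_filter_eq_get? (d : List (String × String)) (c : String)
    (h : (d.map Prod.fst).Nodup) :
    (d.filter (fun p => p.1 == c)).map (·.2)
    = ((PySem.Dict.mk d).get? c).toList := by
  induction d with
  | nil => rfl
  | cons kv d ih =>
    obtain ⟨k, v⟩ := kv
    simp only [List.map_cons, List.nodup_cons] at h
    rw [List.filter_cons]
    by_cases hk : k = c
    · have hb : ((k, v).1 == c) = true := by simp [hk]
      have hrest : (d.filter (fun p => p.1 == c)) = [] := by
        rw [List.filter_eq_nil_iff]
        intro p hp hpc
        exact absurd (by
          have hpc' : p.1 = c := by simpa using hpc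
          rw [hk, ← hpc']
          exact List.mem_map_of_mem hp) h.1
      simp [hrest, PySem.Dict.get?_mk_cons, hk]
    · have hb : ((k, v).1 == c) = false := by simp [hk]
      simp only [hb, Bool.false_eq_true, if_false]
      rw [ih h.2]
      simp [PySem.Dict.get?_mk_cons, hb]

theorem pv_flatten_filter (properties : List (List (String × String))) (c : String)
    (h : ∀ d ∈ properties, (d.map Prod.fst).Nodup) :
    ((properties.flatten).filter (fun p => p.1 == c)).map (·.2)
    = pvGather properties c := by
  induction properties with
  | nil => simp [pvGather]
  | cons d ds ih =>
    simp only [List.flatten_cons, List.filter_append, List.map_append]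
    rw [ih (fun x hx => h x (List.mem_cons_of_mem _ hx)),
        pv_filter_eq_get? d c (h d (List.mem_cons_self ..))]
    simp only [pvGather, List.filterMap_cons]
    cases (PySem.Dict.mk d).get? c <;> simp

theorem pvB_eq_foldl_step (properties : List (List (String × String))) (prop_names : List String)
    (h : ∀ d ∈ properties, (d.map Prod.fst).Nodup) :
    get_saved_category_property_by_name_alt properties prop_names
    = prop_names.foldl (fun acc n => acc ++ pvStep properties n) [] := by
  unfold get_saved_category_property_by_name_alt
  apply PySem.List.foldl_congr_mem
  intro acc n _
  rw [pvBuildIndex_eq_flat, pv_get?_fold]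
  have hf := pv_flatten_filter properties n h
  by_cases he : ((properties.flatten).filter (fun p => p.1 == n)).isEmpty
  · rw [if_pos he]
    have hg : (pvGather properties n).isEmpty = true := by
      rw [← hf]
      simp only [List.isEmpty_iff] at he ⊢
      simp [he]
    simp [pvStep, hg]
  · rw [if_neg he]
    have hne : (pvGather properties n).isEmpty = false := by
      rw [← hf, Bool.eq_false_iff]
      intro hx
      apply he
      simp only [List.isEmpty_iff, List.map_eq_nil_iff] at hx ⊢
      exact hx
    rw [hf]
    simp [pvStep, hne]

-- ===== VERDICT (by name: the statement is the Claim_ definition above) =====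
theorem get_saved_category_property_by_name_spec : Claim_equal_get_saved_category_property_by_name := by
  intro properties prop_names _ hpre
  unfold Spec_get_saved_category_property_by_name
  rw [pvA_eq_foldl_step, pvB_eq_foldl_step properties prop_names hpre]
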